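-- pv_equiv track=rewrite | github.com/ziminl/cs | hw4/Homework4.py | checkSortRec
-- ===== SOURCE A (Python) =====
-- def checkSortRec(lst):
--     """ Check is the list is properly sorted
--
--     Args:
--         lst (list): input list containing numerical values
--
--     Returns:
--         bool: True if the list is sorted, otherwise False
--     """
--     if len(lst) == 1:
--         return True
--     else:
--         if lst[0] <= lst[1]:
--             return checkSortRec(lst[1:])
--         elif lst[0] >= lst[1]:
--             return False
-- ===== SOURCE B (Python) =====
-- def checkSortRec(lst):
--     """Single linear scan comparing adjacent elements."""
--     return all(x <= y for x, y in zip(lst, lst[1:]))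
-- ===== Notes on version B (the rewrite author's own statement) =====
-- stated objective: faster
-- what changed: Replaced the recursion that copies the tail with lst[1:] at every step (quadratic copying, and recursion-depth limited) with a single iterative linear scan over adjacent pairs.
import Mathlib
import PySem

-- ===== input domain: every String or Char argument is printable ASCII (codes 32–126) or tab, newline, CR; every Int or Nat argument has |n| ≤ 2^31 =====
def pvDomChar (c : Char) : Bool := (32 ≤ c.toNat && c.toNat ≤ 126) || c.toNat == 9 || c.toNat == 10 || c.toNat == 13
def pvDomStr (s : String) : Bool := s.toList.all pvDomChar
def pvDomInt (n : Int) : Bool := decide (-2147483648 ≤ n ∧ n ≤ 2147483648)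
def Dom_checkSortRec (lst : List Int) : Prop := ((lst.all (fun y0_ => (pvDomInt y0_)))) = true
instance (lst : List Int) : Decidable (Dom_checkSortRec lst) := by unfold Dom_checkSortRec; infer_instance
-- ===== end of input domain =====

-- B replaces A's tail-copying recursion with one linear scan over adjacent pairs (asymptotically faster).

-- ===== PORT A =====
-- A's recursion on lst[1:]: `a :: b :: rest` matches A reading lst[0], lst[1] and recursing on
-- the slice lst[1:] = b :: rest; the `[]` branch is where Python raises IndexError (outside Pre_).
def checkSortRec (lst : List Int) : Bool :=
  if lst.length = 1 then true
  else
    match lst with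
    | a :: b :: rest => if a ≤ b then checkSortRec (b :: rest) else false
    | _ => false  -- Python raises IndexError here (empty list); excluded by Pre_checkSortRec

-- ===== PORT B =====
-- B: all(x <= y for x, y in zip(lst, lst[1:]))
def checkSortRec_alt (lst : List Int) : Bool :=
  (lst.zip lst.tail).all (fun p => p.1 ≤ p.2)

-- ===== PRECONDITION & SPEC =====
-- A raises IndexError on the empty list; Pre_ excludes exactly that input.
def Pre_checkSortRec (lst : List Int) : Prop := lst ≠ []
instance (lst : List Int) : Decidable (Pre_checkSortRec lst) := by unfold Pre_checkSortRec; infer_instance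
def pvWitness_checkSortRec : List Int := ([1, 2, 2, 5])

def Spec_checkSortRec (lst : List Int) (out : Bool) : Prop := out = checkSortRec_alt lst
instance (lst : List Int) (out : Bool) : Decidable (Spec_checkSortRec lst out) := by unfold Spec_checkSortRec; infer_instance

-- ===== CLAIM (what is proved, stated in full; the proofs are below) =====
def Claim_equal_checkSortRec : Prop := ∀ (lst : List Int), Dom_checkSortRec lst → Pre_checkSortRec lst → Spec_checkSortRec lst (checkSortRec lst)

-- ===== LEMMAS AND PROOFS =====
theorem alt_cons_cons (a b : Int) (rest : List Int) :
    checkSortRec_alt (a :: b :: rest) = ((decide (a ≤ b)) && checkSortRec_alt (b :: rest)) := by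
  simp [checkSortRec_alt, List.zip]

theorem checkSortRec_eq_alt : ∀ (lst : List Int), lst ≠ [] → checkSortRec lst = checkSortRec_alt lst
  | [], h => absurd rfl h
  | [a], _ => by simp [checkSortRec, checkSortRec_alt]
  | a :: b :: rest, _ => by
    rw [alt_cons_cons]
    unfold checkSortRec
    simp only [List.length_cons]
    by_cases hab : a ≤ b
    · simp [hab, checkSortRec_eq_alt (b :: rest) (by simp)]
    · simp [hab]

-- ===== VERDICT (by name: the statement is the Claim_ definition above) =====
theorem checkSortRec_spec : Claim_equal_checkSortRec := by
  intro lst _ hpre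
  exact checkSortRec_eq_alt lst hpre
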